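-- pv_equiv track=rewrite | github.com/pedrocastellucci/notas-de-aula | content/vault/src/morse_decode.py | search
-- ===== SOURCE A (Python) =====
-- tree = [
--     None,
--     'E',
--     'T',
--     'I',
--     'A',
--     'N',
--     'M',
--     'S',
--     'U',
--     'R',
--     'W',
--     'D',
--     'K',
--     'G',
--     'O',
--     'H',
--     'V',
--     'F',
--     None,
--     'L',
--     None,
--     'P',
--     'J',
--     'B',
--     'X',
--     'C',
--     'Y',
--     'Z',
--     'Q',
-- ]
--
-- def left_child(i):
--     return 2*i + 1
--
-- def right_child(i):
--     return 2*i + 2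
--
-- def search(char, idx, code):
--     if idx > len(tree):
--         return False
--     elif tree[idx] == char:
--         return True
--     elif search(char, left_child(idx), code):
--         code.insert(0, '.')
--         return True
--     elif search(char, right_child(idx), code):
--         code.insert(0, '-')
--         return True
--     return False
-- ===== SOURCE B (Python) =====
-- tree = [
--     None, 'E', 'T', 'I', 'A', 'N', 'M', 'S', 'U', 'R', 'W', 'D', 'K', 'G',
--     'O', 'H', 'V', 'F', None, 'L', None, 'P', 'J', 'B', 'X', 'C', 'Y', 'Z', 'Q',
-- ]
--
-- def search(char, idx, code):
--     # Iterative preorder DFS with an explicit stack of (index, path-so-far) pairs.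
--     stack = [(idx, [])]
--     while stack:
--         i, path = stack.pop()
--         if i > len(tree):
--             continue
--         if tree[i] == char:
--             code[:0] = path
--             return True
--         stack.append((2 * i + 2, path + ['-']))
--         stack.append((2 * i + 1, path + ['.']))
--     return False
-- ===== Notes on version B (the rewrite author's own statement) =====
-- stated objective: alternative
-- what changed: Replaces the four-branch recursion with an explicit-stack iterative preorder DFS that carries each node's direction path and splices it into code on a match (same bound check and index math, so raising/mutation behaviour is identical).
-- outside the precondition, e.g. on search('Q', -1, []): A returns True, B returns True
import Mathlib
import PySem

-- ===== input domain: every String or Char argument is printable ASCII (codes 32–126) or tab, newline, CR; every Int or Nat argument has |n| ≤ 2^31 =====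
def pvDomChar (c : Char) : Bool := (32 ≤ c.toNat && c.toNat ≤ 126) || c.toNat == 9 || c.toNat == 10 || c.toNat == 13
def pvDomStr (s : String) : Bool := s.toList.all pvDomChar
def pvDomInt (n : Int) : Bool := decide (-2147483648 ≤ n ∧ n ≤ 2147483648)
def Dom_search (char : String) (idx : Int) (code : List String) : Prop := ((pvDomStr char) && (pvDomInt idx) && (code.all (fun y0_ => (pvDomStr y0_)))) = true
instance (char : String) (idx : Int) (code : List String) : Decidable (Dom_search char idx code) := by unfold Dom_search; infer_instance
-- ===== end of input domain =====

-- B replaces the recursion by an explicit-stack iterative preorder DFS (same index math and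
-- bound check); equivalence is about the RETURN value only — both Pythons also prepend the
-- found path into `code` in place, identically, but that mutation is not modelled here.


-- ===== PORT A =====
-- module-level `tree` (len(tree) = 29)
def treeL : List (Option String) :=
  [none, some "E", some "T", some "I", some "A", some "N", some "M", some "S", some "U",
   some "R", some "W", some "D", some "K", some "G", some "O", some "H", some "V", some "F",
   none, some "L", none, some "P", some "J", some "B", some "X", some "C", some "Y",
   some "Z", some "Q"]

-- A's recursion, fuel-bounded for totality only (Python diverges for negative idx, outside Pre_).
-- `code` does not affect the returned bool, so the helper omits it.
def searchFuelA : Nat → String → Int → Bool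
  | 0, _, _ => false
  | f + 1, char, idx =>
    if idx > (treeL.length : Int) then false
    else
      match PySem.List.pyGet? treeL idx with
      | none => false  -- Python raises IndexError here (tree[29]); excluded by Pre_search
      | some t =>
        if t == some char then true
        else if searchFuelA f char (2 * idx + 1) then true
        else if searchFuelA f char (2 * idx + 2) then true
        else false

def search (char : String) (idx : Int) (code : List String) : Bool :=
  searchFuelA 64 char idx

-- ===== PORT B =====
-- B's explicit stack of (index, direction-path) pairs, popped in LIFO order; fuel-bounded
-- for totality only (the loop runs forever in Python only for negative idx, outside Pre_).
-- The path only feeds the in-place mutation of `code`, not the returned bool.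
def searchLoopB : Nat → String → List (Int × List String) → Bool
  | 0, _, _ => false
  | _ + 1, _, [] => false
  | f + 1, char, (i, path) :: rest =>
    if i > (treeL.length : Int) then searchLoopB f char rest
    else
      match PySem.List.pyGet? treeL i with
      | none => false  -- Python raises IndexError here; excluded by Pre_search
      | some t =>
        if t == some char then true
        else searchLoopB f char ((2 * i + 1, path ++ ["."]) :: (2 * i + 2, path ++ ["-"]) :: rest)

def search_alt (char : String) (idx : Int) (code : List String) : Bool :=
  searchLoopB 256 char [(idx, [])]

-- ===== PRECONDITION & SPEC =====
def pvLetters : List String :=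
  ["E","T","I","A","N","M","S","U","R","W","D","K","G","O","H","V","F","L","P","J","B","X","C","Y","Z","Q"]

-- Pre_ excludes exactly the inputs on which the Python A does not return: negative idx (Python's
-- negative-index wraparound, ending in RecursionError/IndexError except for an accidental immediate
-- match on which both programs agree anyway), and idx = 29 or a char absent from the subtree rooted
-- at idx ∈ {0, 2, 6, 14}, where the traversal reads tree[29] and raises IndexError.
def Pre_search (char : String) (idx : Int) (code : List String) : Prop :=
  0 ≤ idx ∧ idx ≠ 29 ∧
  (idx = 0 → char ∈ pvLetters) ∧
  (idx = 2 → char ∈ (["T","N","M","D","K","G","O","B","X","C","Y","Z","Q"] : List String)) ∧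
  (idx = 6 → char ∈ (["M","G","O","Z","Q"] : List String)) ∧
  (idx = 14 → char = "O")
instance (char : String) (idx : Int) (code : List String) : Decidable (Pre_search char idx code) := by
  unfold Pre_search; infer_instance

def pvWitness_search : String × Int × List String := ("E", 0, [])

def Spec_search (char : String) (idx : Int) (code : List String) (out : Bool) : Prop := out = search_alt char idx code
instance (char : String) (idx : Int) (code : List String) (out : Bool) : Decidable (Spec_search char idx code out) := by unfold Spec_search; infer_instance

-- ===== CLAIM (what is proved, stated in full; the proofs are below) =====
def Claim_equal_search : Prop := ∀ (char : String) (idx : Int) (code : List String), Dom_search char idx code → Pre_search char idx code → Spec_search char idx code (search char idx code)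

-- ===== LEMMAS AND PROOFS =====

lemma len_treeL : (treeL.length : Int) = 29 := rfl

-- every letter stored in the tree is in pvLetters
lemma tree_letters : ∀ t ∈ treeL, ∀ s, t = some s → s ∈ pvLetters := by decide

lemma A_nomatch (char : String) (hc : char ∉ pvLetters) :
    ∀ f idx, searchFuelA f char idx = false := by
  intro f
  induction f with
  | zero => intro idx; rfl
  | succ f ih =>
    intro idx
    rw [searchFuelA]
    split
    · rfl
    · rcases hg : PySem.List.pyGet? treeL idx with _ | t
      · rfl
      · have hmem := PySem.List.mem_of_pyGet?_eq_some treeL hg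
        have hne : (t == some char) = false := by
          rcases t with _ | s
          · rfl
          · have hs := tree_letters _ hmem s rfl
            have hne' : s ≠ char := fun h => hc (h ▸ hs)
            simp [hne']
        simp [hne, ih]

lemma B_nomatch (char : String) (hc : char ∉ pvLetters) :
    ∀ f stack, searchLoopB f char stack = false := by
  intro f
  induction f with
  | zero => intro stack; rfl
  | succ f ih =>
    intro stack
    rcases stack with _ | ⟨⟨i, path⟩, rest⟩
    · rfl
    · rw [searchLoopB]
      split
      · exact ih _
      · rcases hg : PySem.List.pyGet? treeL i with _ | t
        · rfl
        · have hmem := PySem.List.mem_of_pyGet?_eq_some treeL hg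
          have hne : (t == some char) = false := by
            rcases t with _ | s
            · rfl
            · have hs := tree_letters _ hmem s rfl
              have hne' : s ≠ char := fun h => hc (h ▸ hs)
              simp [hne']
          simp [hne, ih]

lemma eq_gt (char : String) (idx : Int) (h : (treeL.length : Int) < idx) :
    searchFuelA 64 char idx = searchLoopB 256 char [(idx, [])] := by
  rw [searchFuelA, searchLoopB, if_pos h, if_pos h]
  rfl

set_option maxHeartbeats 4000000 in
lemma eq_small :
    ∀ c ∈ pvLetters, ∀ n ∈ List.range 30,
      searchFuelA 64 c (n : Int) = searchLoopB 256 c [((n : Int), [])] := by decide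

-- ===== VERDICT (by name: the statement is the Claim_ definition above) =====
theorem search_spec : Claim_equal_search := by
  intro char idx code _ hpre
  unfold Spec_search search search_alt
  by_cases hc : char ∈ pvLetters
  · by_cases hgt : (treeL.length : Int) < idx
    · exact eq_gt char idx hgt
    · have h0 : 0 ≤ idx := hpre.1
      have hle : idx ≤ 29 := by rw [len_treeL] at hgt; omega
      have hn : idx = ((idx.toNat : Nat) : Int) := (Int.toNat_of_nonneg h0).symm
      have hlt : idx.toNat ∈ List.range 30 := by
        simp only [List.mem_range]; omega
      rw [hn]
      exact eq_small char hc idx.toNat hlt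
  · rw [A_nomatch char hc, B_nomatch char hc]
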